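-- pv_equiv track=rewrite | github.com/Jaehyeon1020/ps-study | 프로그래머스/1/77484. 로또의 최고 순위와 최저 순위/로또의 최고 순위와 최저 순위.py | solution
-- ===== SOURCE A (Python) =====
-- def solution(lottos, win_nums):
--     match_count = 0
--     zero_count = 0
--
--     for l in lottos:
--         if l != 0 and l in win_nums:
--             match_count += 1
--         elif l == 0:
--             zero_count += 1
--
--     # 0이 모두 일치하도록 바뀌는 경우
--     best_match_count = match_count + zero_count
--     best = 0
--     if best_match_count == 0 or best_match_count == 1:
--         best = 6
--     else:
--         best = 6 - (best_match_count -1)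
--
--     # 0이 모두 불일치하도록 바뀌는 경우
--     worst = 0
--     if match_count == 0 or match_count == 1:
--         worst = 6
--     else:
--         worst = 6 - (match_count - 1)
--
--     return [best, worst]
-- ===== SOURCE B (Python) =====
-- def solution(lottos, win_nums):
--     # sort both sides, then one merge-style scan counts matches and zeros
--     ls = sorted(lottos)
--     ws = sorted(set(win_nums))
--     j = 0
--     matches = 0
--     zeros = 0
--     for v in ls:
--         if v == 0:
--             zeros += 1
--             continue
--         while j < len(ws) and ws[j] < v:
--             j += 1
--         if j < len(ws) and ws[j] == v:
--             matches += 1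
--     return [min(6, 7 - matches - zeros), min(6, 7 - matches)]
-- ===== Notes on version B (the rewrite author's own statement) =====
-- stated objective: faster
-- what changed: Replaces A's nested membership scan (for each lotto number, a linear search of win_nums) by sorting both lists and counting matches and zeros in one merge-style two-pointer scan over the sorted lists, with the branchy rank arithmetic collapsed to min(6, 7 - k).
import Mathlib
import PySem

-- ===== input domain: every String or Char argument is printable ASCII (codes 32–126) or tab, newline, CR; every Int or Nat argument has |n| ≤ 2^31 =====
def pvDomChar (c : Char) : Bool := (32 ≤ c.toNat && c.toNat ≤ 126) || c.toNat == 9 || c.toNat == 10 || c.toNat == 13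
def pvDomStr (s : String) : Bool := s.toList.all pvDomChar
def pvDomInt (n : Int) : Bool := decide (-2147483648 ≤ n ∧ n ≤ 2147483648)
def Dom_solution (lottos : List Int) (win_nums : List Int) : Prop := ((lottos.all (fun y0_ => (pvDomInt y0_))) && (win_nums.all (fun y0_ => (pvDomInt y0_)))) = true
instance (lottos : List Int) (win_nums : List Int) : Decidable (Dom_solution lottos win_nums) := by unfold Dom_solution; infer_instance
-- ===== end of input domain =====

-- B sorts both lists and counts matches/zeros with one merge-style two-pointer scan instead of A's nested membership scan; rank arithmetic becomes min 6 (7 - k).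


-- ===== PORT A =====
def solution (lottos : List Int) (win_nums : List Int) : List Int :=
  let st := lottos.foldl (fun (st : Int × Int) l =>
    if l ≠ 0 ∧ l ∈ win_nums then (st.1 + 1, st.2)
    else if l = 0 then (st.1, st.2 + 1)
    else st) (0, 0)
  let match_count := st.1
  let zero_count := st.2
  let best_match_count := match_count + zero_count
  let best : Int := if best_match_count = 0 ∨ best_match_count = 1 then 6 else 6 - (best_match_count - 1)
  let worst : Int := if match_count = 0 ∨ match_count = 1 then 6 else 6 - (match_count - 1)
  [best, worst]

-- ===== PORT B =====
-- B's for-loop over sorted lottos with pointer j into ws; the pointer j is represented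
-- by the remaining suffix of ws ('while j < len(ws) and ws[j] < v: j += 1' = dropWhile).
def solutionScan (ls : List Int) (ws : List Int) (m z : Int) : Int × Int :=
  match ls with
  | [] => (m, z)
  | v :: rest =>
    if v = 0 then solutionScan rest ws m (z + 1)
    else
      match ws.dropWhile (fun w => decide (w < v)) with
      | [] => solutionScan rest [] m z
      | w :: t => if w = v then solutionScan rest (w :: t) (m + 1) z
                  else solutionScan rest (w :: t) m z

def solution_alt (lottos : List Int) (win_nums : List Int) : List Int :=
  let ls := PySem.List.sorted lottos (fun x => x)
  let ws := PySem.List.sorted (PySem.Set.ofList win_nums) (fun x => x)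
  let mz := solutionScan ls ws 0 0
  [min 6 (7 - mz.1 - mz.2), min 6 (7 - mz.1)]

-- ===== PRECONDITION & SPEC =====
def Spec_solution (lottos : List Int) (win_nums : List Int) (out : List Int) : Prop := out = solution_alt lottos win_nums
instance (lottos : List Int) (win_nums : List Int) (out : List Int) : Decidable (Spec_solution lottos win_nums out) := by unfold Spec_solution; infer_instance

-- ===== CLAIM (what is proved, stated in full; the proofs are below) =====
def Claim_equal_solution : Prop := ∀ (lottos : List Int) (win_nums : List Int), Dom_solution lottos win_nums → Spec_solution lottos win_nums (solution lottos win_nums)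

-- ===== LEMMAS AND PROOFS =====

-- A's loop returns (mc + #matches, zc + #zeros)
lemma loopA_eq (win_nums : List Int) (lottos : List Int) : ∀ (mc zc : Int),
    lottos.foldl (fun (st : Int × Int) l =>
      if l ≠ 0 ∧ l ∈ win_nums then (st.1 + 1, st.2)
      else if l = 0 then (st.1, st.2 + 1)
      else st) (mc, zc)
    = (mc + (lottos.countP (fun l => decide (l ≠ 0 ∧ l ∈ win_nums)) : Int),
       zc + (lottos.count 0 : Int)) := by
  induction lottos with
  | nil => intro mc zc; simp
  | cons h t ih =>
    intro mc zc
    rw [List.foldl_cons]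
    by_cases hp : h ≠ 0 ∧ h ∈ win_nums
    · rw [if_pos hp, ih]
      have h1 : (h :: t).countP (fun l => decide (l ≠ 0 ∧ l ∈ win_nums))
          = t.countP (fun l => decide (l ≠ 0 ∧ l ∈ win_nums)) + 1 := by
        simp [hp.1, hp.2]
      have h2 : (h :: t).count 0 = t.count 0 := by simp [hp.1]
      rw [h1, h2, Prod.ext_iff]
      exact ⟨by push_cast; ring, rfl⟩
    · rw [if_neg hp]
      by_cases hz : h = 0
      · rw [if_pos hz, ih]
        have h1 : (h :: t).countP (fun l => decide (l ≠ 0 ∧ l ∈ win_nums))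
            = t.countP (fun l => decide (l ≠ 0 ∧ l ∈ win_nums)) := by simp [hz]
        have h2 : (h :: t).count 0 = t.count 0 + 1 := by simp [hz]
        rw [h1, h2, Prod.ext_iff]
        exact ⟨rfl, by push_cast; ring⟩
      · rw [if_neg hz, ih]
        have h1 : (h :: t).countP (fun l => decide (l ≠ 0 ∧ l ∈ win_nums))
            = t.countP (fun l => decide (l ≠ 0 ∧ l ∈ win_nums)) := by
          simp only [List.countP_cons]
          simp [hz]
          intro hw
          exact absurd ⟨hz, hw⟩ hp
        have h2 : (h :: t).count 0 = t.count 0 := by simp [hz]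
        rw [h1, h2]

-- dropping the < v prefix of ws does not change membership of any v' ≥ v
lemma mem_dropWhile_lt_iff (ws : List Int) (v v' : Int) (hvv : v ≤ v') :
    v' ∈ ws.dropWhile (fun w => decide (w < v)) ↔ v' ∈ ws := by
  constructor
  · intro h
    exact (List.dropWhile_sublist _).mem h
  · intro h
    rw [← List.takeWhile_append_dropWhile (p := fun w => decide (w < v)) (l := ws)] at h
    rcases List.mem_append.1 h with h1 | h2
    · have h3 := List.mem_takeWhile_imp h1
      simp only [decide_eq_true_eq] at h3
      omega
    · exact h2

-- on a sorted ws, the head of dropWhile (< v) is v exactly when v ∈ ws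
lemma head_dropWhile_lt (ws : List Int) (hws : ws.Pairwise (· ≤ ·)) (v : Int)
    (w : Int) (t : List Int) (hd : ws.dropWhile (fun w => decide (w < v)) = w :: t) :
    (w = v ↔ v ∈ ws) := by
  constructor
  · intro he
    subst he
    have hmem : w ∈ ws.dropWhile (fun x => decide (x < w)) := by rw [hd]; exact .head _
    exact (List.dropWhile_sublist _).mem hmem
  · intro hv
    have hvmem : v ∈ w :: t := by
      rw [← hd, mem_dropWhile_lt_iff ws v v le_rfl]; exact hv
    have hp : (w :: t).Pairwise (· ≤ ·) := by
      rw [← hd]; exact hws.sublist (List.dropWhile_sublist _)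
    have h1 : w ≤ v := by
      rcases List.mem_cons.1 hvmem with he | hx
      · exact le_of_eq he.symm
      · exact List.rel_of_pairwise_cons hp hx
    have h2 : ¬ (w < v) := by
      have h3 := List.head?_dropWhile_not (fun x => decide (x < v)) ws
      rw [hd] at h3
      simpa using h3
    omega

-- B's merge scan counts matches against W and zeros, for sorted inputs
lemma scan_eq (W : List Int) : ∀ (ls ws : List Int) (m z : Int),
    ls.Pairwise (· ≤ ·) → ws.Pairwise (· ≤ ·) →
    (∀ v ∈ ls, (v ∈ ws ↔ v ∈ W)) →
    solutionScan ls ws m z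
      = (m + (ls.countP (fun l => decide (l ≠ 0 ∧ l ∈ W)) : Int),
         z + (ls.count 0 : Int)) := by
  intro ls
  induction ls with
  | nil => intro ws m z _ _ _; simp [solutionScan]
  | cons v rest ih =>
    intro ws m z hls hws hmem
    have hrest : rest.Pairwise (· ≤ ·) := hls.of_cons
    have hvle : ∀ x ∈ rest, v ≤ x := fun x hx => List.rel_of_pairwise_cons hls hx
    by_cases hv : v = 0
    · subst hv
      rw [solutionScan, if_pos rfl, ih ws m (z + 1) hrest hws
        (fun x hx => hmem x (.tail _ hx))]
      have h1 : (0 :: rest).countP (fun l => decide (l ≠ 0 ∧ l ∈ W))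
          = rest.countP (fun l => decide (l ≠ 0 ∧ l ∈ W)) := by simp
      have h2 : ((0 : Int) :: rest).count 0 = rest.count 0 + 1 := by simp
      rw [h1, h2, Prod.ext_iff]
      exact ⟨rfl, by push_cast; ring⟩
    · have hws'p : (ws.dropWhile (fun w => decide (w < v))).Pairwise (· ≤ ·) :=
        hws.sublist (List.dropWhile_sublist _)
      have hmem' : ∀ x ∈ rest, (x ∈ ws.dropWhile (fun w => decide (w < v)) ↔ x ∈ W) := by
        intro x hx
        rw [mem_dropWhile_lt_iff ws v x (hvle x hx)]
        exact hmem x (.tail _ hx)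
      have hcnt0 : ((v : Int) :: rest).count 0 = rest.count 0 := by simp [hv]
      rw [solutionScan, if_neg hv]
      rcases hd : ws.dropWhile (fun w => decide (w < v)) with _ | ⟨w, t⟩
      · have hvnot : v ∉ W := by
          intro h
          have h4 : v ∈ ws.dropWhile (fun w => decide (w < v)) :=
            (mem_dropWhile_lt_iff ws v v le_rfl).2 ((hmem v (.head _)).2 h)
          rw [hd] at h4
          exact absurd h4 List.not_mem_nil
        show solutionScan rest [] m z = _
        rw [ih [] m z hrest (by simp) (by rw [← hd]; exact hmem')]
        have h1 : (v :: rest).countP (fun l => decide (l ≠ 0 ∧ l ∈ W))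
            = rest.countP (fun l => decide (l ≠ 0 ∧ l ∈ W)) := by simp [hvnot]
        rw [h1, hcnt0]
      · show (if w = v then solutionScan rest (w :: t) (m + 1) z
              else solutionScan rest (w :: t) m z) = _
        have hiff : (w = v ↔ v ∈ W) := by
          rw [head_dropWhile_lt ws hws v w t hd]
          exact hmem v (.head _)
        have hws't : (w :: t).Pairwise (· ≤ ·) := hd ▸ hws'p
        have hmem't : ∀ x ∈ rest, (x ∈ w :: t ↔ x ∈ W) := by
          intro x hx; rw [← hd]; exact hmem' x hx
        by_cases hwv : w = v
        · rw [if_pos hwv, ih (w :: t) (m + 1) z hrest hws't hmem't]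
          have hvW : v ∈ W := hiff.1 hwv
          have h1 : (v :: rest).countP (fun l => decide (l ≠ 0 ∧ l ∈ W))
              = rest.countP (fun l => decide (l ≠ 0 ∧ l ∈ W)) + 1 := by simp [hv, hvW]
          rw [h1, hcnt0, Prod.ext_iff]
          exact ⟨by push_cast; ring, rfl⟩
        · rw [if_neg hwv, ih (w :: t) m z hrest hws't hmem't]
          have hvW : v ∉ W := fun h => hwv (hiff.2 h)
          have h1 : (v :: rest).countP (fun l => decide (l ≠ 0 ∧ l ∈ W))
              = rest.countP (fun l => decide (l ≠ 0 ∧ l ∈ W)) := by simp [hvW]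
          rw [h1, hcnt0]

-- A's branchy rank arithmetic equals B's closed form, for nonnegative k
lemma rank_eq (k : Int) (hk : 0 ≤ k) :
    (if k = 0 ∨ k = 1 then (6 : Int) else 6 - (k - 1)) = min 6 (7 - k) := by
  split_ifs with h <;> omega

-- ===== VERDICT (by name: the statement is the Claim_ definition above) =====
theorem solution_spec : Claim_equal_solution := by
  intro lottos win_nums _
  show solution lottos win_nums = solution_alt lottos win_nums
  have hlsP : (PySem.List.sorted lottos (fun x => x)).Pairwise (· ≤ ·) :=
    PySem.List.sorted_pairwise lottos (fun x => x)
  have hwsP : (PySem.List.sorted (PySem.Set.ofList win_nums) (fun x => x)).Pairwise (· ≤ ·) :=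
    (PySem.List.sorted_ofList_pairwise_lt win_nums).imp (fun h => le_of_lt h)
  have hmem : ∀ v ∈ PySem.List.sorted lottos (fun x => x),
      (v ∈ PySem.List.sorted (PySem.Set.ofList win_nums) (fun x => x) ↔ v ∈ win_nums) := by
    intro v _
    simp [PySem.List.mem_sorted, PySem.Set.mem_ofList]
  have hperm : (PySem.List.sorted lottos (fun x => x)).Perm lottos :=
    PySem.List.sorted_perm lottos (fun x => x) false
  simp only [solution, solution_alt, loopA_eq,
    scan_eq win_nums _ _ 0 0 hlsP hwsP hmem, zero_add,
    hperm.countP_eq, hperm.count_eq]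
  have hm : (0 : Int) ≤ (lottos.countP (fun l => decide (l ≠ 0 ∧ l ∈ win_nums)) : Int) := by positivity
  have hz : (0 : Int) ≤ (lottos.count 0 : Int) := by positivity
  rw [rank_eq _ (by omega), rank_eq _ hm, sub_sub]
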